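-- pv_equiv track=rewrite | github.com/keerthana-rajbr/python-basics-practice | python_numeric_100_programs/022_sum_and_product_of_digits.py | sum_of_digits
-- ===== SOURCE A (Python) =====
-- def sum_of_digits(number):
--     if number == 0:
--         return 0, 0
--     result, product = 0, 1
--     while number > 0:
--         digit = number % 10
--         result += digit
--         product *= digit
--         number //= 10
--     return result, product
-- ===== SOURCE B (Python) =====
-- def sum_of_digits(number):
--     if number == 0:
--         return 0, 0
--     s, p = 0, 1
--     if number > 0:
--         for ch in str(number):
--             d = int(ch)
--             s += d
--             p *= d
--     return s, p
-- ===== Notes on version B (the rewrite author's own statement) =====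
-- stated objective: idiomatic
-- what changed: B extracts digits by iterating over the characters of str(number) instead of peeling them off with modulo/floor-division arithmetic in a while loop; for non-positive numbers no digits are accumulated, matching A's loop that never runs there.
import Mathlib
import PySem

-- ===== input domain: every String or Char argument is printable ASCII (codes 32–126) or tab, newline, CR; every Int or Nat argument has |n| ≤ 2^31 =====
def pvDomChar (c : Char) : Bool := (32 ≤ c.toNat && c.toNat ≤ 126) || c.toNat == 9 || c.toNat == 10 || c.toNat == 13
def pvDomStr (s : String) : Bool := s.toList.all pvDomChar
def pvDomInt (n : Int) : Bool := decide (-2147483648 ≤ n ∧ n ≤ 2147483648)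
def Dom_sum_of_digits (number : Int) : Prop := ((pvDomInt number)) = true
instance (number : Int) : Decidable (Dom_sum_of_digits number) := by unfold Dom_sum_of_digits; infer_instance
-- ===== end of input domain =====

-- B re-implements the digit loop over the characters of str(number) instead of %10 / //10 arithmetic (objective: idiomatic).

-- ===== PORT A =====
def pvLoopA (number result product : Int) : Int × Int :=
  if number > 0 then
    pvLoopA (PySem.Int.floordiv number 10)
      (result + PySem.Int.mod number 10)
      (product * PySem.Int.mod number 10)
  else (result, product)
termination_by number.toNat
decreasing_by
  rename_i h
  rw [PySem.Int.floordiv_eq_ediv_of_pos (by omega : (0:Int) < 10)]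
  omega

def sum_of_digits (number : Int) : Int × Int :=
  if number == 0 then (0, 0)
  else pvLoopA number 0 1

-- ===== PORT B =====
-- int(ch) is ported by hand as the char code minus 48; exact here since str of a
-- positive int yields only the digit characters '0'..'9'.
def sum_of_digits_alt (number : Int) : Int × Int :=
  if number == 0 then (0, 0)
  else if number > 0 then
    (PySem.Int.toChars number).foldl
      (fun (acc : Int × Int) (ch : Char) =>
        (acc.1 + ((ch.toNat : Int) - 48), acc.2 * ((ch.toNat : Int) - 48)))
      (0, 1)
  else (0, 1)


-- ===== PRECONDITION & SPEC =====
def Spec_sum_of_digits (number : Int) (out : Int × Int) : Prop := out = sum_of_digits_alt number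
instance (number : Int) (out : Int × Int) : Decidable (Spec_sum_of_digits number out) := by unfold Spec_sum_of_digits; infer_instance

-- ===== CLAIM (what is proved, stated in full; the proofs are below) =====
def Claim_equal_sum_of_digits : Prop := ∀ (number : Int), Dom_sum_of_digits number → Spec_sum_of_digits number (sum_of_digits number)

-- ===== LEMMAS AND PROOFS =====

-- integer digit sum / product of a natural number (via Nat.digits)
def pvS (m : Nat) : Int := ((Nat.digits 10 m).map (fun d => (d : Int))).sum
def pvP (m : Nat) : Int := ((Nat.digits 10 m).map (fun d => (d : Int))).prod

lemma pvLoopA_eq (m : Nat) : ∀ (s p : Int),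
    pvLoopA (m : Int) s p = (s + pvS m, p * pvP m) := by
  induction m using Nat.strong_induction_on with
  | _ m ih =>
    intro s p
    rcases Nat.eq_zero_or_pos m with hm | hm
    · subst hm
      rw [pvLoopA]
      simp [pvS, pvP]
    · rw [pvLoopA]
      have h10 : ((m : Int)).toNat = m := Int.toNat_natCast m
      rw [if_pos (by exact_mod_cast hm)]
      rw [show PySem.Int.floordiv (m : Int) 10 = ((m / 10 : Nat) : Int) from PySem.Int.floordiv_natCast m 10,
          show PySem.Int.mod (m : Int) 10 = ((m % 10 : Nat) : Int) from PySem.Int.mod_natCast m 10]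
      rw [ih (m / 10) (Nat.div_lt_self hm (by omega)) _ _]
      have hdig : Nat.digits 10 m = m % 10 :: Nat.digits 10 (m / 10) :=
        Nat.digits_def' (by omega) hm
      simp [pvS, pvP, hdig]
      constructor
      · push_cast; ring
      · push_cast; ring

lemma pvDigitChar_val (d : Nat) (hd : d < 10) :
    ((Nat.digitChar d).toNat : Int) - 48 = (d : Int) := by
  interval_cases d <;> decide

lemma pvFold_toDigits (m : Nat) (hm : 0 < m) : ∀ (s p : Int),
    (Nat.toDigits 10 m).foldl
        (fun (acc : Int × Int) (ch : Char) =>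
          (acc.1 + ((ch.toNat : Int) - 48), acc.2 * ((ch.toNat : Int) - 48)))
        (s, p)
      = (s + pvS m, p * pvP m) := by
  induction m using Nat.strong_induction_on with
  | _ m ih =>
    intro s p
    by_cases hlt : m < 10
    · rw [Nat.toDigits_of_lt_base hlt]
      have hdig : Nat.digits 10 m = [m] := by
        rw [Nat.digits_def' (by omega) hm]
        simp [Nat.mod_eq_of_lt hlt, Nat.div_eq_of_lt hlt]
      simp [pvS, pvP, hdig, pvDigitChar_val m hlt]
    · rw [Nat.toDigits_of_base_le (by omega) (by omega)]
      rw [List.foldl_append]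
      rw [ih (m / 10) (Nat.div_lt_self hm (by omega)) (by omega) s p]
      have hdig : Nat.digits 10 m = m % 10 :: Nat.digits 10 (m / 10) :=
        Nat.digits_def' (by omega) hm
      simp [pvS, pvP, hdig, pvDigitChar_val (m % 10) (Nat.mod_lt m (by omega))]
      constructor
      · ring
      · ring

-- ===== VERDICT (by name: the statement is the Claim_ definition above) =====
theorem sum_of_digits_spec : Claim_equal_sum_of_digits := by
  intro number _
  unfold Spec_sum_of_digits sum_of_digits sum_of_digits_alt
  by_cases h0 : number = 0
  · simp [h0]
  · rw [if_neg (by simpa using h0), if_neg (by simpa using h0)]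
    by_cases hpos : number > 0
    · rw [if_pos hpos]
      have hm : number = ((number.toNat : Nat) : Int) := by omega
      rw [hm]
      rw [pvLoopA_eq number.toNat 0 1]
      rw [PySem.Int.toChars]
      rw [if_neg (by omega)]
      rw [Int.toNat_natCast]
      rw [pvFold_toDigits number.toNat (by omega) 0 1]
    · rw [if_neg hpos]
      rw [pvLoopA]
      rw [if_neg hpos]
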